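-- pv_equiv track=rewrite | github.com/DEUS-AI/SynapseFlow | src/application/services/ontology_quality_service.py | _is_valid_hierarchy
-- ===== SOURCE A (Python) =====
-- from typing import List, Dict, Any, Optional, Set
--
-- def _is_valid_hierarchy(
--
--     source_labels: Set[str],
--     target_labels: Set[str],
--     rel_type: str
-- ) -> bool:
--     """Check if a hierarchy relationship is valid."""
--     # Define valid parent-child combinations
--     valid_combinations = {
--         # Attribute can belong to DataEntity
--         ("Attribute", "DataEntity"),
--         ("Column", "Table"),
--         # InformationAsset derives from DataEntity
--         ("InformationAsset", "DataEntity"),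
--         # Concepts can be related
--         ("BusinessConcept", "BusinessConcept"),
--         ("BusinessConcept", "Domain"),
--         # Domain hierarchy
--         ("Domain", "Domain"),
--     }
--
--     # Check if any valid combination matches
--     for source_label in source_labels:
--         for target_label in target_labels:
--             if (source_label, target_label) in valid_combinations:
--                 return True
--
--     # Allow same-type relationships
--     if source_labels & target_labels:
--         return True
--
--     return False
-- ===== SOURCE B (Python) =====
-- def _is_valid_hierarchy(
--     source_labels,
--     target_labels,
--     rel_type
-- ) -> bool:
--     """Check if a hierarchy relationship is valid (flag-based closed formula)."""
--     # compute membership flags once, then decide with one boolean formula: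
--     # no table of combinations and no pair scan at all
--     s_attr = "Attribute" in source_labels
--     s_col = "Column" in source_labels
--     s_info = "InformationAsset" in source_labels
--     s_bc = "BusinessConcept" in source_labels
--     s_dom = "Domain" in source_labels
--     t_de = "DataEntity" in target_labels
--     t_tab = "Table" in target_labels
--     t_bc = "BusinessConcept" in target_labels
--     t_dom = "Domain" in target_labels
--     if (((s_attr or s_info) and t_de)
--             or (s_col and t_tab)
--             or (s_bc and (t_bc or t_dom))
--             or (s_dom and t_dom)):
--         return True
--     # same-type fallback
--     return not source_labels.isdisjoint(target_labels)
-- ===== Notes on version B (the rewrite author's own statement) =====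
-- stated objective: faster
-- what changed: B keeps no table of valid combinations at all: it computes nine membership flags (which relevant parent labels occur among the sources, which child labels occur among the targets) and decides with one closed boolean formula, with the same-type fallback expressed as not-isdisjoint; A scans every source-target pair against a set of tuples.
import Mathlib
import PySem

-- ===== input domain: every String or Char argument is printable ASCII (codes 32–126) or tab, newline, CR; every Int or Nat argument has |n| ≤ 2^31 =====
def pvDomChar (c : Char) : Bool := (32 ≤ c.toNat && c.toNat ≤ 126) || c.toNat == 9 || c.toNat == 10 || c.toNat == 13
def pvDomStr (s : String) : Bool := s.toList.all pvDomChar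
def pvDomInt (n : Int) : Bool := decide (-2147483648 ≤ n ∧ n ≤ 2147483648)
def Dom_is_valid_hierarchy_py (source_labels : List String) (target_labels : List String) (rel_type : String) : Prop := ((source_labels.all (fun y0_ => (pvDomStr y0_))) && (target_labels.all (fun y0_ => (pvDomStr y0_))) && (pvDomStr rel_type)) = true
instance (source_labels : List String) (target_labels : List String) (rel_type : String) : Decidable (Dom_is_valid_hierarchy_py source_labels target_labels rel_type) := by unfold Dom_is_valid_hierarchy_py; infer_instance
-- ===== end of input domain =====

-- B drops the combination table entirely: it computes nine membership flags and decides
-- with one closed boolean formula, same-type fallback via isdisjoint (objective: faster — flags replace the pair scan).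

-- ===== PORT A =====
-- the literal set of valid (parent, child) combinations from A
def pvValidCombos : List (String × String) :=
  [("Attribute", "DataEntity"), ("Column", "Table"), ("InformationAsset", "DataEntity"),
   ("BusinessConcept", "BusinessConcept"), ("BusinessConcept", "Domain"), ("Domain", "Domain")]

def is_valid_hierarchy_py (source_labels : List String) (target_labels : List String) (rel_type : String) : Bool :=
  -- nested for-loops with early return: any source, any target, pair in valid_combinations
  if source_labels.any (fun source_label =>
       target_labels.any (fun target_label =>
         (source_label, target_label) ∈ pvValidCombos)) then
    true
  -- same-type fallback: 'if source_labels & target_labels' (set intersection is truthy)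
  else if !(source_labels ∩ target_labels).isEmpty then
    true
  else
    false

-- ===== PORT B =====
def is_valid_hierarchy_py_alt (source_labels : List String) (target_labels : List String) (rel_type : String) : Bool :=
  -- membership flags computed once
  let s_attr := source_labels.contains "Attribute"
  let s_col := source_labels.contains "Column"
  let s_info := source_labels.contains "InformationAsset"
  let s_bc := source_labels.contains "BusinessConcept"
  let s_dom := source_labels.contains "Domain"
  let t_de := target_labels.contains "DataEntity"
  let t_tab := target_labels.contains "Table"
  let t_bc := target_labels.contains "BusinessConcept"
  let t_dom := target_labels.contains "Domain"
  -- one closed boolean formula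
  if ((s_attr || s_info) && t_de) || (s_col && t_tab)
      || (s_bc && (t_bc || t_dom)) || (s_dom && t_dom) then
    true
  else
    -- 'not source_labels.isdisjoint(target_labels)'
    !(source_labels.all (fun s => !target_labels.contains s))

-- ===== PRECONDITION & SPEC =====
def Spec_is_valid_hierarchy_py (source_labels : List String) (target_labels : List String) (rel_type : String) (out : Bool) : Prop := out = is_valid_hierarchy_py_alt source_labels target_labels rel_type
instance (source_labels : List String) (target_labels : List String) (rel_type : String) (out : Bool) : Decidable (Spec_is_valid_hierarchy_py source_labels target_labels rel_type out) := by unfold Spec_is_valid_hierarchy_py; infer_instance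

-- ===== CLAIM (what is proved, stated in full; the proofs are below) =====
def Claim_equal_is_valid_hierarchy_py : Prop := ∀ (source_labels : List String) (target_labels : List String) (rel_type : String), Dom_is_valid_hierarchy_py source_labels target_labels rel_type → Spec_is_valid_hierarchy_py source_labels target_labels rel_type (is_valid_hierarchy_py source_labels target_labels rel_type)

-- ===== LEMMAS AND PROOFS =====
-- A's nested pair scan equals B's closed flag formula
theorem pvScan_eq_flags (S T : List String) :
    (S.any (fun s => T.any (fun t => (s, t) ∈ pvValidCombos))) =
    (((S.contains "Attribute" || S.contains "InformationAsset") && T.contains "DataEntity")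
      || (S.contains "Column" && T.contains "Table")
      || (S.contains "BusinessConcept" && (T.contains "BusinessConcept" || T.contains "Domain"))
      || (S.contains "Domain" && T.contains "Domain")) := by
  rw [Bool.eq_iff_iff]
  simp only [List.any_eq_true, Bool.or_eq_true, Bool.and_eq_true, List.contains_eq_mem,
    decide_eq_true_eq, pvValidCombos, List.mem_cons, List.not_mem_nil, or_false,
    Prod.mk.injEq]
  constructor
  · rintro ⟨s, hs, t, ht, hc⟩
    rcases hc with ⟨h1, h2⟩ | ⟨h1, h2⟩ | ⟨h1, h2⟩ | ⟨h1, h2⟩ | ⟨h1, h2⟩ | ⟨h1, h2⟩ <;>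
      subst h1 <;> subst h2 <;> tauto
  · intro h
    rcases h with ((⟨hA | hI, hT⟩ | ⟨hs, ht⟩) | ⟨hs, hB | hD⟩) | ⟨hs, ht⟩
    · exact ⟨_, hA, _, hT, Or.inl ⟨rfl, rfl⟩⟩
    · exact ⟨_, hI, _, hT, Or.inr (Or.inr (Or.inl ⟨rfl, rfl⟩))⟩
    · exact ⟨_, hs, _, ht, Or.inr (Or.inl ⟨rfl, rfl⟩)⟩
    · exact ⟨_, hs, _, hB, Or.inr (Or.inr (Or.inr (Or.inl ⟨rfl, rfl⟩)))⟩
    · exact ⟨_, hs, _, hD, Or.inr (Or.inr (Or.inr (Or.inr (Or.inl ⟨rfl, rfl⟩))))⟩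
    · exact ⟨_, hs, _, ht, Or.inr (Or.inr (Or.inr (Or.inr (Or.inr ⟨rfl, rfl⟩))))⟩

-- A's truthy intersection equals B's negated isdisjoint
theorem pvInter_eq_disjoint (S T : List String) :
    (!(S ∩ T).isEmpty) = (!(S.all (fun s => !T.contains s))) := by
  rw [Bool.eq_iff_iff]
  simp only [Bool.not_eq_eq_eq_not, Bool.not_true, List.isEmpty_eq_false_iff, ne_eq,
    List.eq_nil_iff_forall_not_mem, List.mem_inter_iff, List.all_eq_false,
    List.contains_eq_mem, not_forall, not_not]
  simp

-- ===== VERDICT (by name: the statement is the Claim_ definition above) =====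
theorem is_valid_hierarchy_py_spec : Claim_equal_is_valid_hierarchy_py := by
  intro S T rel_type _
  unfold Spec_is_valid_hierarchy_py is_valid_hierarchy_py is_valid_hierarchy_py_alt
  simp only [pvScan_eq_flags, pvInter_eq_disjoint]
  split_ifs <;> simp_all
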